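-- pv_equiv track=rewrite | github.com/vidagy/aoc | aoc/year_2023/task_01.py | replace_last
-- ===== SOURCE A (Python) =====
-- DIGITS = {
--     "one": 1,
--     "two": 2,
--     "three": 3,
--     "four": 4,
--     "five": 5,
--     "six": 6,
--     "seven": 7,
--     "eight": 8,
--     "nine": 9,
-- }
--
-- def replace_last(line: str) -> str:
--     line = line[::-1]
--     pos = len(line)
--     digit = "one"
--     for k in DIGITS:
--         where = line.find(k[::-1])
--         if where != -1 and where < pos:
--             digit = k
--             pos = where
--     return line.replace(digit[::-1], str(DIGITS[digit]), 1)[::-1]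
-- ===== SOURCE B (Python) =====
-- DIGITS = {
--     "one": 1,
--     "two": 2,
--     "three": 3,
--     "four": 4,
--     "five": 5,
--     "six": 6,
--     "seven": 7,
--     "eight": 8,
--     "nine": 9,
-- }
--
-- def replace_last(line: str) -> str:
--     for i in range(len(line) - 1, -1, -1):
--         for word, d in DIGITS.items():
--             if line.startswith(word, i):
--                 return line[:i] + str(d) + line[i + len(word):]
--     return line
-- ===== Notes on version B (the rewrite author's own statement) =====
-- stated objective: alternative
-- what changed: Instead of reversing the string and taking the per-word minimum of str.find positions followed by a count-1 replace and a second reversal, B scans start indices right-to-left once and tests startswith for each digit word, splicing at the first (i.e. rightmost) match; no reversal, no replace.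
import Mathlib
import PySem

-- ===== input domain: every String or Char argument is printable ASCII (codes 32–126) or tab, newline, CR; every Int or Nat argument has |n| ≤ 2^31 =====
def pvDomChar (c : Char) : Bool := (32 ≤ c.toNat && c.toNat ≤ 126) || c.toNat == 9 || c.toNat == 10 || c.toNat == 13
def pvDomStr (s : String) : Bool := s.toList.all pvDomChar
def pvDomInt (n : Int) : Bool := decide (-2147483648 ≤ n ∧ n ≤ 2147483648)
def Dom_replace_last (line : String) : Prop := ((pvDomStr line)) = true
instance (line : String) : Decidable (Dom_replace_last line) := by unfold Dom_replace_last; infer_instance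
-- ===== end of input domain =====

-- B replaces A's reverse + per-word str.find minimum + count-1 replace + reverse by a single
-- right-to-left scan over start indices testing startswith; same return value (alternative decomposition).

-- ===== PORT A =====
def DIGITS : List (String × Int) :=
  [("one", 1), ("two", 2), ("three", 3), ("four", 4), ("five", 5),
   ("six", 6), ("seven", 7), ("eight", 8), ("nine", 9)]

def replace_last (line : String) : String :=
  -- line = line[::-1]  (PySem.Str.slice?_none_none_neg_one: s[::-1] is exactly reversal)
  let l : List Char := line.toList.reverse
  -- pos = len(line); digit = "one"; for k in DIGITS: …
  let st : String × Int := DIGITS.foldl (fun (st : String × Int) k =>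
      let w := PySem.Chars.find l k.1.toList.reverse
      if w ≠ -1 ∧ w < st.2 then (k.1, w) else st)
    ("one", (l.length : Int))
  let digit := st.1
  -- line.replace(digit[::-1], str(DIGITS[digit]), 1)[::-1]; count-1 replace ported by hand
  -- (PySem.Str.replace has no count): splice str(DIGITS[digit]) at the FIRST occurrence, exact.
  -- digit is always a key of DIGITS, so getD's default 0 is never used.
  let rw := digit.toList.reverse
  let p := PySem.Chars.find l rw
  let repl := if p = -1 then l
    else l.take p.toNat ++ (PySem.Int.toStr (PySem.Dict.getD (PySem.Dict.mk DIGITS) digit 0)).toList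
         ++ l.drop (p.toNat + rw.length)
  String.ofList repl.reverse

-- ===== PORT B =====
-- for i in range(len(line)-1, -1, -1): structural countdown; i+1 ↦ body at index i.
-- line.startswith(word, i) ported by hand as isPrefixOf on l.drop i (exact for 0 ≤ i ≤ len);
-- the inner for-with-return is List.find? in DIGITS order.
def altGo (l : List Char) : Nat → List Char
  | 0 => l
  | i + 1 =>
    match DIGITS.find? (fun k => k.1.toList.isPrefixOf (l.drop i)) with
    | some k => l.take i ++ (PySem.Int.toStr k.2).toList ++ l.drop (i + k.1.toList.length)
    | none => altGo l i

def replace_last_alt (line : String) : String :=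
  String.ofList (altGo line.toList line.toList.length)

-- ===== PRECONDITION & SPEC =====
def Spec_replace_last (line : String) (out : String) : Prop := out = replace_last_alt line
instance (line : String) (out : String) : Decidable (Spec_replace_last line out) := by unfold Spec_replace_last; infer_instance

-- ===== CLAIM (what is proved, stated in full; the proofs are below) =====
def Claim_equal_replace_last : Prop := ∀ (line : String), Dom_replace_last line → Spec_replace_last line (replace_last line)

-- ===== LEMMAS AND PROOFS =====

def wlist (kv : String × Int) : List Char := kv.1.toList

-- decidable facts about the fixed digit-word table
lemma digits_infix : ∀ kv1 ∈ DIGITS, ∀ kv2 ∈ DIGITS, wlist kv1 <:+: wlist kv2 → kv1 = kv2 := by decide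

lemma digits_ne_nil : ∀ kv ∈ DIGITS, wlist kv ≠ [] := by decide

lemma digits_toStr_rev : ∀ kv ∈ DIGITS,
    (PySem.Int.toStr kv.2).toList.reverse = (PySem.Int.toStr kv.2).toList := by decide

lemma digits_getD : ∀ kv ∈ DIGITS, PySem.Dict.getD (PySem.Dict.mk DIGITS) kv.1 0 = kv.2 := by decide

lemma occ_le {l w : List Char} {i : Nat} (hw : w ≠ []) (h : w <+: l.drop i) :
    i + w.length ≤ l.length := by
  have h1 := h.length_le
  have h2 : w.length ≠ 0 := fun hh => hw (List.length_eq_zero_iff.mp hh)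
  simp only [List.length_drop] at h1
  omega

lemma occ_overlap {l w1 w2 : List Char} {i1 i2 : Nat}
    (h1 : w1 <+: l.drop i1) (h2 : w2 <+: l.drop i2)
    (h12 : i1 ≤ i2) (hend : i2 + w2.length ≤ i1 + w1.length) :
    w2 <:+: w1 := by
  have e1 : w1 = (l.drop i1).take w1.length := List.prefix_iff_eq_take.mp h1
  have e2 : w2 = (l.drop i2).take w2.length := List.prefix_iff_eq_take.mp h2
  have hd : l.drop i2 = (l.drop i1).drop (i2 - i1) := by
    rw [List.drop_drop]; congr 1; omega
  have h3 : w2.length ≤ w1.length - (i2 - i1) := by omega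
  have key : w2 = (w1.drop (i2 - i1)).take w2.length := by
    calc w2 = ((l.drop i1).drop (i2 - i1)).take w2.length := by rw [← hd]; exact e2
      _ = (w1.drop (i2 - i1)).take w2.length := by
          rw [e1, List.drop_take, List.take_take, min_eq_left h3]
  rw [key]
  exact ((List.take_prefix _ _).isInfix).trans ((List.drop_suffix _ _).isInfix)

lemma uniq_at {l : List Char} {i : Nat} {kv kv' : String × Int} (h : kv ∈ DIGITS) (h' : kv' ∈ DIGITS)
    (ho : wlist kv <+: l.drop i) (ho' : wlist kv' <+: l.drop i) : kv' = kv := by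
  rcases le_total (wlist kv').length (wlist kv).length with hle | hle
  · exact digits_infix kv' h' kv h (List.prefix_of_prefix_length_le ho' ho hle).isInfix
  · exact (digits_infix kv h kv' h' (List.prefix_of_prefix_length_le ho ho' hle).isInfix).symm

lemma suffix_take_iff {l w : List Char} {e : Nat} (he : e ≤ l.length) :
    w <:+ l.take e ↔ w.length ≤ e ∧ w <+: l.drop (e - w.length) := by
  have hlen : (l.take e).length = e := by simp [he]
  constructor
  · intro h
    have hwl : w.length ≤ e := hlen ▸ h.length_le
    refine ⟨hwl, ?_⟩
    have h5 := List.suffix_iff_eq_drop.mp h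
    rw [hlen] at h5
    have h4 : e - (e - w.length) = w.length := by omega
    rw [List.drop_take, h4] at h5
    exact List.prefix_iff_eq_take.mpr h5
  · rintro ⟨hwl, h⟩
    have h4 : e - (e - w.length) = w.length := by omega
    rw [List.suffix_iff_eq_drop, hlen, List.drop_take, h4]
    exact List.prefix_iff_eq_take.mp h

lemma rev_prefix_iff {l w : List Char} {p : Nat} (hp : p ≤ l.length) :
    w.reverse <+: l.reverse.drop p ↔ w.length + p ≤ l.length ∧ w <+: l.drop (l.length - p - w.length) := by
  rw [List.drop_reverse, List.reverse_prefix,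
    suffix_take_iff (by omega : l.length - p ≤ l.length)]
  constructor
  · rintro ⟨h1, h2⟩
    exact ⟨by omega, by rwa [show l.length - p - w.length = l.length - p - w.length from rfl]⟩
  · rintro ⟨h1, h2⟩
    exact ⟨by omega, h2⟩

lemma find_eq_neg_one_iff_no_occ (l w : List Char) :
    PySem.Chars.find l.reverse w.reverse = -1 ↔ ∀ j, ¬ w <+: l.drop j := by
  rw [PySem.Chars.find_eq_neg_one_iff, List.reverse_infix, ← PySem.Chars.isIn_iff_infix,
    ← PySem.Chars.exists_prefix_drop_iff_isIn]
  exact not_exists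

lemma find_spec_occ {l w : List Char} (hw : w ≠ [])
    (hf : PySem.Chars.find l.reverse w.reverse ≠ -1) :
    ∃ p : Nat, PySem.Chars.find l.reverse w.reverse = (p : Int) ∧ p + w.length ≤ l.length ∧
      w <+: l.drop (l.length - p - w.length) ∧
      ∀ j, w <+: l.drop j → j + w.length ≤ l.length - p := by
  have hm1 := PySem.Chars.neg_one_le_find l.reverse w.reverse
  have h0 : 0 ≤ PySem.Chars.find l.reverse w.reverse := by
    rcases lt_or_eq_of_le hm1 with h | h
    · omega
    · exact absurd h.symm hf
  obtain ⟨hpre, hmin⟩ := PySem.Chars.find_spec h0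
  set p : Nat := (PySem.Chars.find l.reverse w.reverse).toNat with hpdef
  have hfind : PySem.Chars.find l.reverse w.reverse = (p : Int) := (Int.toNat_of_nonneg h0).symm
  have hple : p ≤ l.length := by
    have := PySem.Chars.find_le_length l.reverse w.reverse
    rw [List.length_reverse] at this
    omega
  obtain ⟨hlen, hocc⟩ := (rev_prefix_iff hple).mp hpre
  refine ⟨p, hfind, by omega, hocc, ?_⟩
  intro j hj
  have hjn : j + w.length ≤ l.length := occ_le hw hj
  set q : Nat := l.length - j - w.length with hqdef
  have hq : w.reverse <+: l.reverse.drop q := by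
    refine (rev_prefix_iff (by omega)).mpr ⟨by omega, ?_⟩
    have : l.length - q - w.length = j := by omega
    rwa [this]
  have : ¬ q < p := fun hlt => hmin q hlt hq
  omega

lemma foldl_stay (ws : List (String × Int)) (f : String × Int → Int) (d0 : String) (p0 : Int)
    (h : ∀ k ∈ ws, ¬(f k ≠ -1 ∧ f k < p0)) :
    ws.foldl (fun st k => if f k ≠ -1 ∧ f k < st.2 then (k.1, f k) else st) (d0, p0) = (d0, p0) := by
  induction ws with
  | nil => rfl
  | cons b ws ih =>
    simp only [List.foldl_cons]
    rw [if_neg (h b (by simp))]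
    exact ih (fun k hk => h k (by simp [hk]))

lemma foldl_min (ws : List (String × Int)) (f : String × Int → Int) :
    ∀ a : String × Int, a ∈ ws → f a ≠ -1 →
    (∀ b ∈ ws, f b ≠ -1 → f a ≤ f b) →
    (∀ b ∈ ws, f b = f a → b.1 = a.1) →
    ∀ (d0 : String) (p0 : Int), f a < p0 →
    ws.foldl (fun st k => if f k ≠ -1 ∧ f k < st.2 then (k.1, f k) else st) (d0, p0) = (a.1, f a) := by
  induction ws with
  | nil => intro a ha; cases ha
  | cons b ws ih =>
    intro a ha hfa hmin huniq d0 p0 hlt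
    simp only [List.foldl_cons]
    by_cases hb : f b ≠ -1 ∧ f b < p0
    · rw [if_pos hb]
      by_cases hba : f b = f a
      · rw [huniq b (by simp) hba, hba]
        exact foldl_stay ws f a.1 (f a) (fun k hk hc =>
          absurd (hmin k (by simp [hk]) hc.1) (not_le.mpr hc.2))
      · have haw : a ∈ ws := by
          rcases List.mem_cons.mp ha with h | h
          · exact absurd (h ▸ rfl : f b = f a) hba
          · exact h
        exact ih a haw hfa (fun k hk => hmin k (by simp [hk]))
          (fun k hk => huniq k (by simp [hk])) b.1 (f b)
          (lt_of_le_of_ne (hmin b (by simp) hb.1) (Ne.symm hba))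
    · rw [if_neg hb]
      have haw : a ∈ ws := by
        rcases List.mem_cons.mp ha with h | h
        · exact absurd ⟨h ▸ hfa, h ▸ hlt⟩ hb
        · exact h
      exact ih a haw hfa (fun k hk => hmin k (by simp [hk]))
        (fun k hk => huniq k (by simp [hk])) d0 p0 hlt

lemma altGo_none (l : List Char) (m : Nat)
    (h : ∀ i < m, ∀ kv ∈ DIGITS, ¬ wlist kv <+: l.drop i) :
    altGo l m = l := by
  induction m with
  | zero => rfl
  | succ i ih =>
    have hfind : DIGITS.find? (fun k => k.1.toList.isPrefixOf (l.drop i)) = none := by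
      rw [List.find?_eq_none]
      intro kv hkv
      simp only [List.isPrefixOf_iff_prefix]
      exact h i (by omega) kv hkv
    simp only [altGo, hfind]
    exact ih (fun j hj kv hkv => h j (by omega) kv hkv)

lemma altGo_found (l : List Char) (i : Nat) (kv : String × Int) (hkv : kv ∈ DIGITS)
    (hocc : wlist kv <+: l.drop i) :
    ∀ m, i < m → (∀ j, i < j → j < m → ∀ kv' ∈ DIGITS, ¬ wlist kv' <+: l.drop j) →
    altGo l m = l.take i ++ (PySem.Int.toStr kv.2).toList ++ l.drop (i + (wlist kv).length) := by
  intro m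
  induction m with
  | zero => intro h; omega
  | succ j ih =>
    intro hij hnone
    by_cases hji : j = i
    · subst hji
      have hsome : (DIGITS.find? (fun k => k.1.toList.isPrefixOf (l.drop j))).isSome := by
        rw [List.find?_isSome]
        exact ⟨kv, hkv, List.isPrefixOf_iff_prefix.mpr hocc⟩
      obtain ⟨kv', hkv'⟩ := Option.isSome_iff_exists.mp hsome
      have hmem := List.mem_of_find?_eq_some hkv'
      have hpre := List.isPrefixOf_iff_prefix.mp (List.find?_some (p := fun k : String × Int => k.1.toList.isPrefixOf (l.drop j)) hkv')
      have heq : kv' = kv := uniq_at hkv hmem hocc hpre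
      subst heq
      simp only [altGo, hkv', wlist]
    · have hfind : DIGITS.find? (fun k => k.1.toList.isPrefixOf (l.drop j)) = none := by
        rw [List.find?_eq_none]
        intro kv' hkv'
        simp only [List.isPrefixOf_iff_prefix]
        exact hnone j (by omega) (by omega) kv' hkv'
      simp only [altGo, hfind]
      exact ih (by omega) (fun j' h1 h2 => hnone j' h1 (by omega))

lemma core_eq (l : List Char) :
    (let lr := l.reverse
     let st : String × Int := DIGITS.foldl (fun (st : String × Int) k =>
         let w := PySem.Chars.find lr k.1.toList.reverse
         if w ≠ -1 ∧ w < st.2 then (k.1, w) else st)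
       ("one", (lr.length : Int))
     let digit := st.1
     let rw := digit.toList.reverse
     let p := PySem.Chars.find lr rw
     let repl := if p = -1 then lr
       else lr.take p.toNat ++ (PySem.Int.toStr (PySem.Dict.getD (PySem.Dict.mk DIGITS) digit 0)).toList
            ++ lr.drop (p.toNat + rw.length)
     repl.reverse) = altGo l l.length := by
  dsimp only
  simp only [List.length_reverse]
  by_cases hex : ∃ i, ∃ kv ∈ DIGITS, wlist kv <+: l.drop i
  · obtain ⟨i0, kv0, hkv0, h0⟩ := hex
    set n := l.length with hn
    set P : Nat → Prop := fun i => ∃ kv ∈ DIGITS, wlist kv <+: l.drop i with hPdef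
    have hPle : ∀ j, P j → j ≤ n := by
      rintro j ⟨kv, hkv, hocc⟩
      have := occ_le (digits_ne_nil kv hkv) hocc
      omega
    set istar := Nat.findGreatest P n with histar_def
    have histar : P istar := Nat.findGreatest_spec (hPle i0 ⟨kv0, hkv0, h0⟩) ⟨kv0, hkv0, h0⟩
    have hle : ∀ j, P j → j ≤ istar := fun j hj => Nat.le_findGreatest (hPle j hj) hj
    obtain ⟨kvs, hkvs, hoccs⟩ := histar
    set ws := wlist kvs with hws
    set L := ws.length with hL
    have hstar_le : istar + L ≤ n := occ_le (digits_ne_nil kvs hkvs) hoccs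
    have hLpos : 0 < L := List.length_pos_iff.mpr (digits_ne_nil kvs hkvs)
    set p := n - (istar + L) with hp
    have hLeq : (wlist kvs).length = L := by rw [hL, hws]
    have hfs_ne : PySem.Chars.find l.reverse ws.reverse ≠ -1 := by
      intro hc
      exact (find_eq_neg_one_iff_no_occ l ws).mp hc istar hoccs
    obtain ⟨ps, hps_eq, hps_le, hps_occ, hps_max⟩ := find_spec_occ (digits_ne_nil kvs hkvs) hfs_ne
    simp only [wlist] at hps_eq
    have hps : ps = p := by
      have h1 := hle _ ⟨kvs, hkvs, hps_occ⟩
      have h2 := hps_max istar hoccs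
      omega
    subst hps
    have hfs_ne' : PySem.Chars.find l.reverse kvs.1.toList.reverse ≠ -1 := hfs_ne
    have hmin : ∀ kv ∈ DIGITS, PySem.Chars.find l.reverse kv.1.toList.reverse ≠ -1 →
        PySem.Chars.find l.reverse kvs.1.toList.reverse ≤ PySem.Chars.find l.reverse kv.1.toList.reverse := by
      intro kv hkv hne
      obtain ⟨q, hq_eq, hq_le, hq_occ, hq_max⟩ := find_spec_occ (digits_ne_nil kv hkv) hne
      simp only [wlist] at hq_eq
      have hj_le : n - q - (wlist kv).length ≤ istar := hle _ ⟨kv, hkv, hq_occ⟩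
      have hend : (n - q - (wlist kv).length) + (wlist kv).length ≤ istar + L := by
        by_contra hc
        push_neg at hc
        have hinf := occ_overlap hq_occ hoccs hj_le (le_of_lt hc)
        have heq := digits_infix kvs hkvs kv hkv hinf
        rw [← heq] at hc
        rw [← heq] at hj_le
        omega
      rw [hps_eq, hq_eq]
      have hkvpos : 0 < (wlist kv).length := List.length_pos_iff.mpr (digits_ne_nil kv hkv)
      have : p ≤ q := by omega
      exact_mod_cast this
    have huniq : ∀ kv ∈ DIGITS, PySem.Chars.find l.reverse kv.1.toList.reverse =
        PySem.Chars.find l.reverse kvs.1.toList.reverse → kv.1 = kvs.1 := by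
      intro kv hkv heq
      have h0' : 0 ≤ PySem.Chars.find l.reverse kv.1.toList.reverse := by
        rw [heq, hps_eq]; omega
      have h0s : 0 ≤ PySem.Chars.find l.reverse kvs.1.toList.reverse := by rw [hps_eq]; omega
      obtain ⟨hpre_k, -⟩ := PySem.Chars.find_spec h0'
      obtain ⟨hpre_s, -⟩ := PySem.Chars.find_spec h0s
      rw [heq] at hpre_k
      have hkey : kv = kvs := by
        rcases le_total kv.1.toList.reverse.length ws.reverse.length with hlen | hlen
        · have := List.prefix_of_prefix_length_le hpre_k hpre_s hlen
          exact digits_infix kv hkv kvs hkvs (List.reverse_prefix.mp this).isInfix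
        · have := List.prefix_of_prefix_length_le hpre_s hpre_k hlen
          exact (digits_infix kvs hkvs kv hkv (List.reverse_prefix.mp this).isInfix).symm
      rw [hkey]
    have hfold := foldl_min DIGITS (fun kv => PySem.Chars.find l.reverse kv.1.toList.reverse)
      kvs hkvs hfs_ne' hmin huniq "one" (n : Int)
      (by show PySem.Chars.find l.reverse kvs.1.toList.reverse < (n : Int)
          rw [hps_eq]; exact_mod_cast (by omega : p < n))
    simp only at hfold
    rw [hfold]
    dsimp only
    rw [hps_eq]
    have hm1 : ¬ ((p : Int) = -1) := by omega
    rw [if_neg hm1]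
    rw [Int.toNat_natCast]
    rw [altGo_found l istar kvs hkvs hoccs n (by omega)
      (fun j h1 h2 kv' hkv' hocc' => absurd (hle j ⟨kv', hkv', hocc'⟩) (by omega))]
    rw [digits_getD kvs hkvs]
    simp only [List.reverse_append, digits_toStr_rev kvs hkvs]
    rw [List.drop_reverse, List.take_reverse, List.reverse_reverse, List.reverse_reverse]
    have e1 : n - (p + kvs.1.toList.length) = istar := by
      have : kvs.1.toList.length = L := by rw [hL, hws, wlist]
      omega
    have e2 : n - p = istar + kvs.1.toList.length := by
      have : kvs.1.toList.length = L := by rw [hL, hws, wlist]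
      omega
    rw [e1, e2]
    simp only [← hws, wlist, List.append_assoc]
  · push_neg at hex
    have hfind : ∀ kv ∈ DIGITS, PySem.Chars.find l.reverse kv.1.toList.reverse = -1 :=
      fun kv hkv => (find_eq_neg_one_iff_no_occ l kv.1.toList).mpr (fun j => hex j kv hkv)
    rw [foldl_stay DIGITS (fun kv => PySem.Chars.find l.reverse kv.1.toList.reverse) "one"
      (l.length : Int) (fun kv hkv hc => hc.1 (hfind kv hkv))]
    have hone : PySem.Chars.find l.reverse ("one".toList.reverse) = -1 :=
      hfind ("one", 1) (by simp [DIGITS])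
    dsimp only
    rw [if_pos hone, List.reverse_reverse]
    exact (altGo_none l l.length (fun i _ kv hkv => hex i kv hkv)).symm

-- ===== VERDICT (by name: the statement is the Claim_ definition above) =====
theorem replace_last_spec : Claim_equal_replace_last := by
  intro line _
  show replace_last line = replace_last_alt line
  unfold replace_last replace_last_alt
  exact congrArg String.ofList (core_eq line.toList)
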